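-- pv_equiv track=rewrite | github.com/AutonomosCdM/vigia | vigia_detect/redis_layer/embeddings.py | preprocess_medical_text
-- ===== SOURCE A (Python) =====
-- def preprocess_medical_text(text: str) -> str:
--     """Preprocess medical text for better embedding quality."""
--     # Standardize medical abbreviations
--     replacements = {
--         "LPP": "lesión por presión",
--         "UPP": "úlcera por presión",
--         "EPUAP": "European Pressure Ulcer Advisory Panel",
--         "NPUAP": "National Pressure Ulcer Advisory Panel",
--     }
--
--     processed = text
--     for abbr, full in replacements.items():
--         processed = processed.replace(abbr, full)
--
--     return processed
-- ===== SOURCE B (Python) =====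
-- _REPLACEMENTS = (
--     ("LPP", "lesión por presión"),
--     ("UPP", "úlcera por presión"),
--     ("EPUAP", "European Pressure Ulcer Advisory Panel"),
--     ("NPUAP", "National Pressure Ulcer Advisory Panel"),
-- )
--
--
-- def preprocess_medical_text(text: str) -> str:
--     """Preprocess medical text: expand the medical abbreviations in one pass."""
--     out = []
--     i = 0
--     n = len(text)
--     while i < n:
--         for abbr, full in _REPLACEMENTS:
--             if text.startswith(abbr, i):
--                 out.append(full)
--                 i += len(abbr)
--                 break
--         else:
--             out.append(text[i])
--             i += 1
--     return "".join(out)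
-- ===== Notes on version B (the rewrite author's own statement) =====
-- stated objective: alternative
-- what changed: B expands all four abbreviations in a single left-to-right scan of the text (startswith at each position) instead of A's four sequential full str.replace passes; the results coincide because no key overlaps another and no replacement value contains a key.
import Mathlib
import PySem

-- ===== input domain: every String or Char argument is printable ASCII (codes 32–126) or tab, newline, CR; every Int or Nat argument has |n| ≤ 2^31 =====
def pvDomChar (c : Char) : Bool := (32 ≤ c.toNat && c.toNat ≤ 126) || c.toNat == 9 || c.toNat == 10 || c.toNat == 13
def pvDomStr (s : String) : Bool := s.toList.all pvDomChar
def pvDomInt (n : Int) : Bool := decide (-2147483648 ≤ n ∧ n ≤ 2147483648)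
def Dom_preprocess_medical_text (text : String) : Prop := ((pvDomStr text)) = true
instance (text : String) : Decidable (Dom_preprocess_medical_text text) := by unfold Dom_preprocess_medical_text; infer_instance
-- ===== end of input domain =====

-- B replaces A's four sequential str.replace passes by a single left-to-right scan that
-- expands each abbreviation in place (objective: alternative single-pass algorithm).

-- ===== PORT A =====
-- literal transliteration of A: a dict of replacements, then one str.replace per item
def preprocess_medical_text (text : String) : String :=
  let replacements : PySem.Dict String String := PySem.Dict.ofList
    [("LPP", "lesión por presión"),
     ("UPP", "úlcera por presión"),
     ("EPUAP", "European Pressure Ulcer Advisory Panel"),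
     ("NPUAP", "National Pressure Ulcer Advisory Panel")]
  replacements.items.foldl (fun processed p => PySem.Str.replace processed p.1 p.2) text

-- ===== PORT B =====
-- B's single pass: at each position try the four abbreviations in order (text.startswith(abbr, i)),
-- emit the expansion and skip the abbreviation on a hit, otherwise emit the character.
def pvScanB : List Char → List Char
  | [] => []
  | c :: t =>
    if ['L','P','P'].isPrefixOf (c :: t) then
      "lesión por presión".toList ++ pvScanB (t.drop 2)
    else if ['U','P','P'].isPrefixOf (c :: t) then
      "úlcera por presión".toList ++ pvScanB (t.drop 2)
    else if ['E','P','U','A','P'].isPrefixOf (c :: t) then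
      "European Pressure Ulcer Advisory Panel".toList ++ pvScanB (t.drop 4)
    else if ['N','P','U','A','P'].isPrefixOf (c :: t) then
      "National Pressure Ulcer Advisory Panel".toList ++ pvScanB (t.drop 4)
    else
      c :: pvScanB t
termination_by l => l.length

def preprocess_medical_text_alt (text : String) : String :=
  String.ofList (pvScanB text.toList)

-- ===== PRECONDITION & SPEC =====
def Spec_preprocess_medical_text (text : String) (out : String) : Prop := out = preprocess_medical_text_alt text
instance (text : String) (out : String) : Decidable (Spec_preprocess_medical_text text out) := by unfold Spec_preprocess_medical_text; infer_instance

-- ===== CLAIM (what is proved, stated in full; the proofs are below) =====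
def Claim_equal_preprocess_medical_text : Prop := ∀ (text : String), Dom_preprocess_medical_text text → Spec_preprocess_medical_text text (preprocess_medical_text text)

-- ===== LEMMAS AND PROOFS =====
-- simple structural form of Python str.replace for a non-empty pattern (head c0, tail k)
def pvRepK (c0 : Char) (k : List Char) (v : List Char) : List Char → List Char
  | [] => []
  | c :: t =>
    if (c0 :: k).isPrefixOf (c :: t) then v ++ pvRepK c0 k v (t.drop k.length)
    else c :: pvRepK c0 k v t
termination_by l => l.length

theorem pvGo_spec (c0 : Char) (k v : List Char) :
    ∀ fuel (l acc : List Char), l.length ≤ fuel →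
      PySem.Chars.replace.go (c0 :: k) v fuel l acc = acc.reverse ++ pvRepK c0 k v l := by
  intro fuel
  induction fuel with
  | zero =>
      intro l acc h
      have : l = [] := List.eq_nil_of_length_eq_zero (Nat.le_zero.mp h)
      subst this
      simp [PySem.Chars.replace.go, pvRepK]
  | succ n ih =>
      intro l acc h
      match l with
      | [] => simp [PySem.Chars.replace.go, pvRepK]
      | c :: t =>
          rw [PySem.Chars.replace.go]
          by_cases hp : (c0 :: k).isPrefixOf (c :: t)
          · rw [if_pos hp]
            have hlen : (List.drop (c0 :: k).length (c :: t)).length ≤ n := by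
              simp at h ⊢; omega
            rw [ih _ _ hlen]
            simp [pvRepK, hp]
          · rw [if_neg hp]
            have hlen : t.length ≤ n := by simp at h; omega
            rw [ih _ _ hlen]
            simp [pvRepK, hp]

theorem pvReplace_eq (c0 : Char) (k v s : List Char) :
    PySem.Chars.replace s (c0 :: k) v = pvRepK c0 k v s := by
  rw [PySem.Chars.replace]
  simp [List.isEmpty]
  exact pvGo_spec c0 k v s.length s [] le_rfl

-- prefix of an append is comparable with the left part
theorem pvPrefixSplit {p w u : List Char} (h : p <+: w ++ u) : p <+: w ∨ w <+: p :=
  List.prefix_or_prefix_of_prefix h (List.prefix_append w u)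

-- a pattern that (with all its nonempty suffixes) cannot start the replacement value v
-- is a prefix of pvRepK's output only where it was a prefix of the input
theorem pvPull (c0 : Char) (k v kk : List Char)
    (Hlen : kk.length ≤ v.length)
    (H : ∀ p ∈ kk.tails, p ≠ [] → ¬ p <+: v) :
    ∀ n t, t.length ≤ n → ∀ p, p ∈ kk.tails → p <+: pvRepK c0 k v t → p <+: t := by
  intro n
  induction n with
  | zero =>
      intro t ht p _ hp
      have : t = [] := List.eq_nil_of_length_eq_zero (Nat.le_zero.mp ht)
      subst this
      simpa [pvRepK] using hp
  | succ m ih =>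
      intro t ht p hmem hp
      match t with
      | [] => simpa [pvRepK] using hp
      | c :: t' =>
          by_cases hpre : (c0 :: k).isPrefixOf (c :: t')
          · rw [pvRepK, if_pos hpre] at hp
            match p with
            | [] => exact List.nil_prefix
            | a :: p' =>
                exfalso
                rcases pvPrefixSplit hp with h1 | h2
                · exact H _ hmem (by simp) h1
                · have hlp : (a :: p').length ≤ kk.length :=
                    ((List.mem_tails _ _).mp hmem).length_le
                  have hl1 : v.length ≤ (a :: p').length := h2.length_le
                  have hve : v = a :: p' := h2.eq_of_length (by omega)
                  exact H _ hmem (by simp) (hve ▸ List.prefix_refl _)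
          · rw [pvRepK, if_neg hpre] at hp
            match p with
            | [] => exact List.nil_prefix
            | a :: p' =>
                rw [List.cons_prefix_cons] at hp
                obtain ⟨rfl, hp'⟩ := hp
                have hmem' : p' ∈ kk.tails := by
                  have h1 : p' <:+ a :: p' := List.suffix_cons a p'
                  exact (List.mem_tails _ _).mpr (h1.trans ((List.mem_tails _ _).mp hmem))
                have ht' : t'.length ≤ m := by simp at ht; omega
                exact List.cons_prefix_cons.mpr ⟨rfl, ih t' ht' p' hmem' hp'⟩

-- a block w none of whose nonempty suffixes can meet the key at or across its end
-- passes through pvRepK unchanged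
theorem pvAppendClean (c0 : Char) (k v w : List Char)
    (H : ∀ s ∈ w.tails, s ≠ [] → ¬ (c0 :: k) <+: s ∧ ¬ s <+: (c0 :: k)) :
    ∀ u, pvRepK c0 k v (w ++ u) = w ++ pvRepK c0 k v u := by
  induction w with
  | nil => intro u; simp
  | cons x w' ih =>
      intro u
      have hcond : ¬ (c0 :: k).isPrefixOf (x :: (w' ++ u)) := by
        rw [List.isPrefixOf_iff_prefix]
        intro hpre
        have hx : (c0 :: k) <+: (x :: w') ++ u := by simpa using hpre
        have hs : (x :: w') ∈ (x :: w').tails := (List.mem_tails _ _).mpr (List.suffix_refl _)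
        rcases pvPrefixSplit hx with h1 | h2
        · exact (H _ hs (by simp)).1 h1
        · exact (H _ hs (by simp)).2 h2
      have H' : ∀ s ∈ w'.tails, s ≠ [] → ¬ (c0 :: k) <+: s ∧ ¬ s <+: (c0 :: k) := by
        intro s hsm hsne
        refine H s ?_ hsne
        rw [List.mem_tails] at hsm ⊢
        exact hsm.trans (List.suffix_cons x w')
      calc pvRepK c0 k v ((x :: w') ++ u)
          = x :: pvRepK c0 k v (w' ++ u) := by rw [List.cons_append, pvRepK, if_neg hcond]
        _ = (x :: w') ++ pvRepK c0 k v u := by rw [ih H']; simp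

def pvV1 : List Char := "lesión por presión".toList
def pvV2 : List Char := "úlcera por presión".toList
def pvV3 : List Char := "European Pressure Ulcer Advisory Panel".toList
def pvV4 : List Char := "National Pressure Ulcer Advisory Panel".toList

theorem pvRepK_hit (c0 : Char) (k v r : List Char) :
    pvRepK c0 k v ((c0 :: k) ++ r) = v ++ pvRepK c0 k v r := by
  rw [List.cons_append, pvRepK, if_pos]
  · rw [List.drop_left' (by simp)]
  · rw [List.isPrefixOf_iff_prefix]
    exact ⟨r, by simp⟩

theorem pvRepK_miss (c0 : Char) (k v : List Char) (c : Char) (t : List Char)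
    (h : ¬ (c0 :: k) <+: (c :: t)) :
    pvRepK c0 k v (c :: t) = c :: pvRepK c0 k v t := by
  rw [pvRepK, if_neg]
  intro hb
  exact h (List.isPrefixOf_iff_prefix.mp hb)

-- the four-pass composition of A equals the one-pass scan of B
theorem pvMain : ∀ (n : Nat) (cs : List Char), cs.length ≤ n →
    pvRepK 'N' ['P','U','A','P'] pvV4 (pvRepK 'E' ['P','U','A','P'] pvV3
      (pvRepK 'U' ['P','P'] pvV2 (pvRepK 'L' ['P','P'] pvV1 cs))) = pvScanB cs := by
  intro n
  induction n with
  | zero =>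
      intro cs h
      have : cs = [] := List.eq_nil_of_length_eq_zero (Nat.le_zero.mp h)
      subst this
      simp [pvRepK, pvScanB]
  | succ m ih =>
      intro cs h
      match cs with
      | [] => simp [pvRepK, pvScanB]
      | c :: t =>
        by_cases h1 : ['L','P','P'] <+: (c :: t)
        · obtain ⟨r, hr⟩ := h1
          rw [← hr]
          have hlen : r.length ≤ m := by
            have := congrArg List.length hr
            simp at this h
            omega
          rw [show (['L','P','P'] ++ r) = 'L' :: 'P' :: 'P' :: r from rfl]
          rw [pvScanB.eq_def]
          simp only []
          rw [if_pos (by rw [List.isPrefixOf_iff_prefix]; exact ⟨r, rfl⟩)]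
          simp only [List.drop_succ_cons, List.drop_zero]
          rw [show ('L' :: 'P' :: 'P' :: r) = ('L' :: ['P','P']) ++ (r) from rfl]
          rw [pvRepK_hit 'L' ['P','P'] pvV1 (r)]
          rw [pvAppendClean 'U' ['P','P'] pvV2 pvV1 (by decide)]
          rw [pvAppendClean 'E' ['P','U','A','P'] pvV3 pvV1 (by decide)]
          rw [pvAppendClean 'N' ['P','U','A','P'] pvV4 pvV1 (by decide)]
          rw [ih r hlen]
          rfl
        by_cases h2 : ['U','P','P'] <+: (c :: t)
        · obtain ⟨r, hr⟩ := h2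
          rw [← hr]
          have hlen : r.length ≤ m := by
            have := congrArg List.length hr
            simp at this h
            omega
          rw [show (['U','P','P'] ++ r) = 'U' :: 'P' :: 'P' :: r from rfl]
          rw [pvScanB.eq_def]
          simp only []
          rw [if_neg (by simp [List.isPrefixOf_iff_prefix, List.cons_prefix_cons]), if_pos (by rw [List.isPrefixOf_iff_prefix]; exact ⟨r, rfl⟩)]
          simp only [List.drop_succ_cons, List.drop_zero]
          rw [pvRepK_miss 'L' ['P','P'] pvV1 'U' ('P' :: 'P' :: r) (by simp [List.cons_prefix_cons])]
          rw [pvRepK_miss 'L' ['P','P'] pvV1 'P' ('P' :: r) (by simp [List.cons_prefix_cons])]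
          rw [pvRepK_miss 'L' ['P','P'] pvV1 'P' (r) (by simp [List.cons_prefix_cons])]
          rw [show ('U' :: 'P' :: 'P' :: pvRepK 'L' ['P','P'] pvV1 (r)) = ('U' :: ['P','P']) ++ (pvRepK 'L' ['P','P'] pvV1 (r)) from rfl]
          rw [pvRepK_hit 'U' ['P','P'] pvV2 (pvRepK 'L' ['P','P'] pvV1 (r))]
          rw [pvAppendClean 'E' ['P','U','A','P'] pvV3 pvV2 (by decide)]
          rw [pvAppendClean 'N' ['P','U','A','P'] pvV4 pvV2 (by decide)]
          rw [ih r hlen]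
          rfl
        by_cases h3 : ['E','P','U','A','P'] <+: (c :: t)
        · obtain ⟨r, hr⟩ := h3
          rw [← hr]
          have hlen : r.length ≤ m := by
            have := congrArg List.length hr
            simp at this h
            omega
          rw [show (['E','P','U','A','P'] ++ r) = 'E' :: 'P' :: 'U' :: 'A' :: 'P' :: r from rfl]
          rw [pvScanB.eq_def]
          simp only []
          rw [if_neg (by simp [List.isPrefixOf_iff_prefix, List.cons_prefix_cons]), if_neg (by simp [List.isPrefixOf_iff_prefix, List.cons_prefix_cons]), if_pos (by rw [List.isPrefixOf_iff_prefix]; exact ⟨r, rfl⟩)]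
          simp only [List.drop_succ_cons, List.drop_zero]
          rw [pvRepK_miss 'L' ['P','P'] pvV1 'E' ('P' :: 'U' :: 'A' :: 'P' :: r) (by simp [List.cons_prefix_cons])]
          rw [pvRepK_miss 'L' ['P','P'] pvV1 'P' ('U' :: 'A' :: 'P' :: r) (by simp [List.cons_prefix_cons])]
          rw [pvRepK_miss 'L' ['P','P'] pvV1 'U' ('A' :: 'P' :: r) (by simp [List.cons_prefix_cons])]
          rw [pvRepK_miss 'L' ['P','P'] pvV1 'A' ('P' :: r) (by simp [List.cons_prefix_cons])]
          rw [pvRepK_miss 'L' ['P','P'] pvV1 'P' (r) (by simp [List.cons_prefix_cons])]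
          rw [pvRepK_miss 'U' ['P','P'] pvV2 'E' ('P' :: 'U' :: 'A' :: 'P' :: pvRepK 'L' ['P','P'] pvV1 (r)) (by simp [List.cons_prefix_cons])]
          rw [pvRepK_miss 'U' ['P','P'] pvV2 'P' ('U' :: 'A' :: 'P' :: pvRepK 'L' ['P','P'] pvV1 (r)) (by simp [List.cons_prefix_cons])]
          rw [pvRepK_miss 'U' ['P','P'] pvV2 'U' ('A' :: 'P' :: pvRepK 'L' ['P','P'] pvV1 (r)) (by simp [List.cons_prefix_cons])]
          rw [pvRepK_miss 'U' ['P','P'] pvV2 'A' ('P' :: pvRepK 'L' ['P','P'] pvV1 (r)) (by simp [List.cons_prefix_cons])]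
          rw [pvRepK_miss 'U' ['P','P'] pvV2 'P' (pvRepK 'L' ['P','P'] pvV1 (r)) (by simp [List.cons_prefix_cons])]
          rw [show ('E' :: 'P' :: 'U' :: 'A' :: 'P' :: pvRepK 'U' ['P','P'] pvV2 (pvRepK 'L' ['P','P'] pvV1 (r))) = ('E' :: ['P','U','A','P']) ++ (pvRepK 'U' ['P','P'] pvV2 (pvRepK 'L' ['P','P'] pvV1 (r))) from rfl]
          rw [pvRepK_hit 'E' ['P','U','A','P'] pvV3 (pvRepK 'U' ['P','P'] pvV2 (pvRepK 'L' ['P','P'] pvV1 (r)))]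
          rw [pvAppendClean 'N' ['P','U','A','P'] pvV4 pvV3 (by decide)]
          rw [ih r hlen]
          rfl
        by_cases h4 : ['N','P','U','A','P'] <+: (c :: t)
        · obtain ⟨r, hr⟩ := h4
          rw [← hr]
          have hlen : r.length ≤ m := by
            have := congrArg List.length hr
            simp at this h
            omega
          rw [show (['N','P','U','A','P'] ++ r) = 'N' :: 'P' :: 'U' :: 'A' :: 'P' :: r from rfl]
          rw [pvScanB.eq_def]
          simp only []
          rw [if_neg (by simp [List.isPrefixOf_iff_prefix, List.cons_prefix_cons]), if_neg (by simp [List.isPrefixOf_iff_prefix, List.cons_prefix_cons]), if_neg (by simp [List.isPrefixOf_iff_prefix, List.cons_prefix_cons]), if_pos (by rw [List.isPrefixOf_iff_prefix]; exact ⟨r, rfl⟩)]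
          simp only [List.drop_succ_cons, List.drop_zero]
          rw [pvRepK_miss 'L' ['P','P'] pvV1 'N' ('P' :: 'U' :: 'A' :: 'P' :: r) (by simp [List.cons_prefix_cons])]
          rw [pvRepK_miss 'L' ['P','P'] pvV1 'P' ('U' :: 'A' :: 'P' :: r) (by simp [List.cons_prefix_cons])]
          rw [pvRepK_miss 'L' ['P','P'] pvV1 'U' ('A' :: 'P' :: r) (by simp [List.cons_prefix_cons])]
          rw [pvRepK_miss 'L' ['P','P'] pvV1 'A' ('P' :: r) (by simp [List.cons_prefix_cons])]
          rw [pvRepK_miss 'L' ['P','P'] pvV1 'P' (r) (by simp [List.cons_prefix_cons])]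
          rw [pvRepK_miss 'U' ['P','P'] pvV2 'N' ('P' :: 'U' :: 'A' :: 'P' :: pvRepK 'L' ['P','P'] pvV1 (r)) (by simp [List.cons_prefix_cons])]
          rw [pvRepK_miss 'U' ['P','P'] pvV2 'P' ('U' :: 'A' :: 'P' :: pvRepK 'L' ['P','P'] pvV1 (r)) (by simp [List.cons_prefix_cons])]
          rw [pvRepK_miss 'U' ['P','P'] pvV2 'U' ('A' :: 'P' :: pvRepK 'L' ['P','P'] pvV1 (r)) (by simp [List.cons_prefix_cons])]
          rw [pvRepK_miss 'U' ['P','P'] pvV2 'A' ('P' :: pvRepK 'L' ['P','P'] pvV1 (r)) (by simp [List.cons_prefix_cons])]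
          rw [pvRepK_miss 'U' ['P','P'] pvV2 'P' (pvRepK 'L' ['P','P'] pvV1 (r)) (by simp [List.cons_prefix_cons])]
          rw [pvRepK_miss 'E' ['P','U','A','P'] pvV3 'N' ('P' :: 'U' :: 'A' :: 'P' :: pvRepK 'U' ['P','P'] pvV2 (pvRepK 'L' ['P','P'] pvV1 (r))) (by simp [List.cons_prefix_cons])]
          rw [pvRepK_miss 'E' ['P','U','A','P'] pvV3 'P' ('U' :: 'A' :: 'P' :: pvRepK 'U' ['P','P'] pvV2 (pvRepK 'L' ['P','P'] pvV1 (r))) (by simp [List.cons_prefix_cons])]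
          rw [pvRepK_miss 'E' ['P','U','A','P'] pvV3 'U' ('A' :: 'P' :: pvRepK 'U' ['P','P'] pvV2 (pvRepK 'L' ['P','P'] pvV1 (r))) (by simp [List.cons_prefix_cons])]
          rw [pvRepK_miss 'E' ['P','U','A','P'] pvV3 'A' ('P' :: pvRepK 'U' ['P','P'] pvV2 (pvRepK 'L' ['P','P'] pvV1 (r))) (by simp [List.cons_prefix_cons])]
          rw [pvRepK_miss 'E' ['P','U','A','P'] pvV3 'P' (pvRepK 'U' ['P','P'] pvV2 (pvRepK 'L' ['P','P'] pvV1 (r))) (by simp [List.cons_prefix_cons])]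
          rw [show ('N' :: 'P' :: 'U' :: 'A' :: 'P' :: pvRepK 'E' ['P','U','A','P'] pvV3 (pvRepK 'U' ['P','P'] pvV2 (pvRepK 'L' ['P','P'] pvV1 (r)))) = ('N' :: ['P','U','A','P']) ++ (pvRepK 'E' ['P','U','A','P'] pvV3 (pvRepK 'U' ['P','P'] pvV2 (pvRepK 'L' ['P','P'] pvV1 (r)))) from rfl]
          rw [pvRepK_hit 'N' ['P','U','A','P'] pvV4 (pvRepK 'E' ['P','U','A','P'] pvV3 (pvRepK 'U' ['P','P'] pvV2 (pvRepK 'L' ['P','P'] pvV1 (r))))]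
          rw [ih r hlen]
          rfl
        -- default: no abbreviation starts at this position
        · have hlen : t.length ≤ m := by simp at h; omega
          have eL := pvRepK_miss 'L' ['P','P'] pvV1 c t h1
          have hx1 : ¬ ['U','P','P'] <+: (c :: pvRepK 'L' ['P','P'] pvV1 (t)) := by
            rw [← eL]
            intro hpre
            exact h2 (pvPull 'L' ['P','P'] pvV1 ['U','P','P'] (by decide) (by decide) (c :: t).length (c :: t) le_rfl _ (by decide) hpre)
          have eU := pvRepK_miss 'U' ['P','P'] pvV2 c (pvRepK 'L' ['P','P'] pvV1 (t)) hx1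
          have hx2 : ¬ ['E','P','U','A','P'] <+: (c :: pvRepK 'U' ['P','P'] pvV2 (pvRepK 'L' ['P','P'] pvV1 (t))) := by
            rw [← eU, ← eL]
            intro hpre
            exact h3 (pvPull 'L' ['P','P'] pvV1 ['E','P','U','A','P'] (by decide) (by decide) (c :: t).length (c :: t) le_rfl _ (by decide) (pvPull 'U' ['P','P'] pvV2 ['E','P','U','A','P'] (by decide) (by decide) (pvRepK 'L' ['P','P'] pvV1 (c :: t)).length (pvRepK 'L' ['P','P'] pvV1 (c :: t)) le_rfl _ (by decide) hpre))
          have eE := pvRepK_miss 'E' ['P','U','A','P'] pvV3 c (pvRepK 'U' ['P','P'] pvV2 (pvRepK 'L' ['P','P'] pvV1 (t))) hx2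
          have hx3 : ¬ ['N','P','U','A','P'] <+: (c :: pvRepK 'E' ['P','U','A','P'] pvV3 (pvRepK 'U' ['P','P'] pvV2 (pvRepK 'L' ['P','P'] pvV1 (t)))) := by
            rw [← eE, ← eU, ← eL]
            intro hpre
            exact h4 (pvPull 'L' ['P','P'] pvV1 ['N','P','U','A','P'] (by decide) (by decide) (c :: t).length (c :: t) le_rfl _ (by decide) (pvPull 'U' ['P','P'] pvV2 ['N','P','U','A','P'] (by decide) (by decide) (pvRepK 'L' ['P','P'] pvV1 (c :: t)).length (pvRepK 'L' ['P','P'] pvV1 (c :: t)) le_rfl _ (by decide) (pvPull 'E' ['P','U','A','P'] pvV3 ['N','P','U','A','P'] (by decide) (by decide) (pvRepK 'U' ['P','P'] pvV2 (pvRepK 'L' ['P','P'] pvV1 (c :: t))).length (pvRepK 'U' ['P','P'] pvV2 (pvRepK 'L' ['P','P'] pvV1 (c :: t))) le_rfl _ (by decide) hpre)))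
          have eN := pvRepK_miss 'N' ['P','U','A','P'] pvV4 c (pvRepK 'E' ['P','U','A','P'] pvV3 (pvRepK 'U' ['P','P'] pvV2 (pvRepK 'L' ['P','P'] pvV1 (t)))) hx3
          rw [eL, eU, eE, eN]
          rw [pvScanB.eq_def]
          simp only []
          rw [if_neg (by intro hb; exact h1 (List.isPrefixOf_iff_prefix.mp hb)), if_neg (by intro hb; exact h2 (List.isPrefixOf_iff_prefix.mp hb)), if_neg (by intro hb; exact h3 (List.isPrefixOf_iff_prefix.mp hb)), if_neg (by intro hb; exact h4 (List.isPrefixOf_iff_prefix.mp hb))]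
          exact congrArg (c :: ·) (ih t hlen)

-- ===== VERDICT (by name: the statement is the Claim_ definition above) =====
theorem preprocess_medical_text_spec : Claim_equal_preprocess_medical_text := by
  intro text _
  unfold Spec_preprocess_medical_text
  have hA : preprocess_medical_text text =
      PySem.Str.replace (PySem.Str.replace (PySem.Str.replace
        (PySem.Str.replace text "LPP" "lesión por presión")
        "UPP" "úlcera por presión")
        "EPUAP" "European Pressure Ulcer Advisory Panel")
        "NPUAP" "National Pressure Ulcer Advisory Panel" := rfl
  apply String.toList_inj.mp
  rw [hA, preprocess_medical_text_alt, String.toList_ofList]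
  rw [PySem.Str.toList_replace, PySem.Str.toList_replace, PySem.Str.toList_replace,
      PySem.Str.toList_replace]
  rw [show ("LPP".toList : List Char) = 'L' :: ['P','P'] from rfl,
      show ("UPP".toList : List Char) = 'U' :: ['P','P'] from rfl,
      show ("EPUAP".toList : List Char) = 'E' :: ['P','U','A','P'] from rfl,
      show ("NPUAP".toList : List Char) = 'N' :: ['P','U','A','P'] from rfl]
  rw [pvReplace_eq, pvReplace_eq, pvReplace_eq, pvReplace_eq]
  exact pvMain text.toList.length text.toList le_rfl
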